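-- pv_equiv track=rewrite | github.com/dibidabidab/lua-serde | load.py | flagDict
-- ===== SOURCE A (Python) =====
-- def flagDict(flags):
--     dict = {
--         'json_with_keys': False,
--         'not_a_component': False,
--         'dirtyable': False,
--     }
--
--     for flag in flags:
--         if not flag in dict:
--             raise Exception('Invalid flag: ' + flag)
--         dict[flag] = True
--
--     return dict
-- ===== SOURCE B (Python) =====
-- def flagDict(flags):
--     flaglist = list(flags)
--     allowed = ('json_with_keys', 'not_a_component', 'dirtyable')
--     for flag in flaglist:
--         if flag not in allowed:
--             raise Exception('Invalid flag: ' + flag)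
--     return {name: name in flaglist for name in allowed}
-- ===== Notes on version B (the rewrite author's own statement) =====
-- stated objective: alternative
-- what changed: B validates the flag list against the fixed allowed tuple and then builds the result in one dict comprehension testing membership of each allowed name in the flag list, instead of mutating a pre-initialized dict per flag.
import Mathlib
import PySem

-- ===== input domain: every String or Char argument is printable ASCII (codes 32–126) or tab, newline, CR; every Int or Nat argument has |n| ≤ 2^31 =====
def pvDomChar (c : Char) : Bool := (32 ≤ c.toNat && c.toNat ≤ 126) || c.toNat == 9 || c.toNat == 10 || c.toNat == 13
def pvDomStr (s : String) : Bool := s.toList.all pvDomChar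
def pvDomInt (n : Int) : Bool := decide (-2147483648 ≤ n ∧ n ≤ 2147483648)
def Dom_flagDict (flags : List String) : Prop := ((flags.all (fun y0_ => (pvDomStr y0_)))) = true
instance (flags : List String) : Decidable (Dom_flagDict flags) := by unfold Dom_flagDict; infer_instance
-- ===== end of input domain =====

-- B validates against the fixed allowed tuple, then builds the result with one membership test per allowed name (no dict mutation).
-- Both versions raise 'Invalid flag: …' on a flag outside the allowed set; Pre_ excludes exactly those inputs.

-- ===== PORT A =====
-- A mutates an initialized dict; on an invalid flag Python raises (excluded by Pre_; that branch leaves the dict unchanged here).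
def flagDictLoop (flags : List String) (d : PySem.Dict String Bool) : PySem.Dict String Bool :=
  flags.foldl (fun d flag => if d.contains flag then d.insert flag true else d) d

def flagDict (flags : List String) : List (String × Bool) :=
  (flagDictLoop flags
    (PySem.Dict.ofList [("json_with_keys", false), ("not_a_component", false), ("dirtyable", false)])).items

-- ===== PORT B =====
def flagDict_alt (flags : List String) : List (String × Bool) :=
  ["json_with_keys", "not_a_component", "dirtyable"].map (fun name => (name, flags.contains name))

-- ===== PRECONDITION & SPEC =====
-- Pre_ excludes exactly the inputs on which A (and B) raise Exception('Invalid flag: …').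
def Pre_flagDict (flags : List String) : Prop :=
  ∀ f ∈ flags, f = "json_with_keys" ∨ f = "not_a_component" ∨ f = "dirtyable"
instance (flags : List String) : Decidable (Pre_flagDict flags) := by unfold Pre_flagDict; infer_instance
def pvWitness_flagDict : List String := ["dirtyable", "json_with_keys"]

def Spec_flagDict (flags : List String) (out : List (String × Bool)) : Prop := out = flagDict_alt flags
instance (flags : List String) (out : List (String × Bool)) : Decidable (Spec_flagDict flags out) := by unfold Spec_flagDict; infer_instance

-- ===== CLAIM (what is proved, stated in full; the proofs are below) =====
def Claim_equal_flagDict : Prop := ∀ (flags : List String), Dom_flagDict flags → Pre_flagDict flags → Spec_flagDict flags (flagDict flags)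

-- ===== LEMMAS AND PROOFS =====
theorem insert_flag_dict3 (b1 b2 b3 : Bool) (k : String) (v : Bool)
    (hk : k = "json_with_keys" ∨ k = "not_a_component" ∨ k = "dirtyable") :
    (PySem.Dict.mk [("json_with_keys", b1), ("not_a_component", b2), ("dirtyable", b3)]).insert k v =
    PySem.Dict.mk [("json_with_keys", if k = "json_with_keys" then v else b1),
                   ("not_a_component", if k = "not_a_component" then v else b2),
                   ("dirtyable", if k = "dirtyable" then v else b3)] := by
  rcases hk with rfl | rfl | rfl <;>
    (apply PySem.Dict.ext;
     simp [PySem.Dict.items_insert_of_contains, PySem.Dict.contains_mk])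

theorem flagDictLoop_items (flags : List String)
    (h : ∀ f ∈ flags, f = "json_with_keys" ∨ f = "not_a_component" ∨ f = "dirtyable") :
    ∀ (b1 b2 b3 : Bool),
      (flagDictLoop flags
        (PySem.Dict.mk [("json_with_keys", b1), ("not_a_component", b2), ("dirtyable", b3)])).items =
      [("json_with_keys", b1 || flags.contains "json_with_keys"),
       ("not_a_component", b2 || flags.contains "not_a_component"),
       ("dirtyable", b3 || flags.contains "dirtyable")] := by
  induction flags with
  | nil => intro b1 b2 b3; simp [flagDictLoop]
  | cons f fs ih =>
    intro b1 b2 b3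
    have hf := h f (List.mem_cons_self ..)
    have hfs : ∀ g ∈ fs, g = "json_with_keys" ∨ g = "not_a_component" ∨ g = "dirtyable" :=
      fun g hg => h g (List.mem_cons_of_mem _ hg)
    simp only [flagDictLoop, List.foldl_cons] at ih ⊢
    have hc : (PySem.Dict.mk [("json_with_keys", b1), ("not_a_component", b2),
        ("dirtyable", b3)]).contains f = true := by
      rcases hf with rfl | rfl | rfl <;> simp [PySem.Dict.contains_mk]
    rw [hc, if_pos rfl, insert_flag_dict3 b1 b2 b3 f true hf, ih hfs]
    rcases hf with rfl | rfl | rfl <;> simp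

-- ===== VERDICT (by name: the statement is the Claim_ definition above) =====
theorem flagDict_spec : Claim_equal_flagDict := by
  intro flags hdom hpre
  unfold Spec_flagDict flagDict flagDict_alt
  rw [show PySem.Dict.ofList [("json_with_keys", false), ("not_a_component", false),
        ("dirtyable", false)] = PySem.Dict.mk [("json_with_keys", false),
        ("not_a_component", false), ("dirtyable", false)] from rfl,
      flagDictLoop_items flags hpre]
  simp
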